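-- pv_equiv track=rewrite | github.com/moorevalista/siprogress | siprogress/globals.py | getSeparator
-- ===== SOURCE A (Python) =====
-- def getSeparator(n):
--     separator = []
--     n += 1
--     counter = 7
--
--     for x in range(n):
--         if x+1 == counter:
--             separator.append(counter)
--             counter += 6
--
--     return separator
-- ===== SOURCE B (Python) =====
-- def getSeparator(n):
--     # Generate the arithmetic progression 7, 13, 19, ... directly.
--     return list(range(7, n + 2, 6))
-- ===== Notes on version B (the rewrite author's own statement) =====
-- stated objective: simpler
-- what changed: B returns the arithmetic progression directly as a single strided range instead of scanning every integer up to n with a maintained counter and per-element branch.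
import Mathlib
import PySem

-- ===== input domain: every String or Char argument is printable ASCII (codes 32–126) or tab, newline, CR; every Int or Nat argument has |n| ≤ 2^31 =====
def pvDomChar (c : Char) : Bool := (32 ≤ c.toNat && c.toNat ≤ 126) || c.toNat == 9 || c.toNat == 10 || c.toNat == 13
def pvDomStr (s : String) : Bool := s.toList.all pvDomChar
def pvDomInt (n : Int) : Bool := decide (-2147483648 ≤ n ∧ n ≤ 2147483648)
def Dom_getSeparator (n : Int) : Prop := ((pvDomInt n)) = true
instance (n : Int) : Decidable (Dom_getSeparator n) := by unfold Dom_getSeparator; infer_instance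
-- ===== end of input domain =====

-- B replaces A's full scan of range(n+1) with a maintained counter by directly
-- generating the arithmetic progression via a strided range (simpler).

set_option maxRecDepth 4000


-- ===== PORT A =====
def getSeparator (n : Int) : List Int :=
  ((PySem.List.pyRange 0 (n + 1) 1).foldl
      (fun (st : List Int × Int) x =>
        if x + 1 = st.2 then (st.1 ++ [st.2], st.2 + 6) else st)
      ([], 7)).1

-- ===== PORT B =====
def getSeparator_alt (n : Int) : List Int :=
  PySem.List.pyRange 7 (n + 2) 6

-- ===== PRECONDITION & SPEC =====
def Spec_getSeparator (n : Int) (out : List Int) : Prop := out = getSeparator_alt n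
instance (n : Int) (out : List Int) : Decidable (Spec_getSeparator n out) := by unfold Spec_getSeparator; infer_instance

-- ===== CLAIM (what is proved, stated in full; the proofs are below) =====
def Claim_equal_getSeparator : Prop := ∀ (n : Int), Dom_getSeparator n → Spec_getSeparator n (getSeparator n)

-- ===== LEMMAS AND PROOFS =====

-- Extending the stop of the step-6 range by one: it gains exactly the element b
-- when b is the next progression value 7 + 6 * (current length).
theorem pyRange6_succ_right (b : Int) (hb : 1 ≤ b) :
    PySem.List.pyRange 7 (b + 1) 6 =
      if b = 7 + 6 * ((PySem.List.pyRange 7 b 6).length : Int)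
      then PySem.List.pyRange 7 b 6 ++ [b]
      else PySem.List.pyRange 7 b 6 := by
  by_cases hb7 : 7 < b
  · rw [PySem.List.pyRange_of_pos 7 (b + 1) (by norm_num),
        PySem.List.pyRange_of_pos 7 b (by norm_num)]
    simp only [List.length_map, List.length_range, if_pos hb7,
               if_pos (show 7 < b + 1 by omega)]
    by_cases heq : b = 7 + 6 * (((b - 7 + 6 - 1) / 6).toNat : Int)
    · rw [if_pos heq]
      have hN : ((b + 1 - 7 + 6 - 1) / 6).toNat = ((b - 7 + 6 - 1) / 6).toNat + 1 := by
        omega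
      rw [hN, List.range_succ, List.map_append, List.map_cons, List.map_nil]
      congr 2
      omega
    · rw [if_neg heq]
      congr 2
      omega
  · have hble : b ≤ 7 := by omega
    interval_cases b <;> decide

-- Loop invariant: after processing x = 0 .. m-1 the accumulated list is the
-- step-6 range up to m (exclusive stop m+1) and the counter is its next value.
theorem loop_inv (m : Nat) :
    (PySem.List.pyRange 0 (m : Int) 1).foldl
        (fun (st : List Int × Int) x =>
          if x + 1 = st.2 then (st.1 ++ [st.2], st.2 + 6) else st)
        ([], 7)
      = (PySem.List.pyRange 7 ((m : Int) + 1) 6,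
         7 + 6 * ((PySem.List.pyRange 7 ((m : Int) + 1) 6).length : Int)) := by
  induction m with
  | zero => decide
  | succ m ih =>
    have hcast : (((m + 1 : Nat)) : Int) = (m : Int) + 1 := by push_cast; ring
    rw [hcast, PySem.List.pyRange_one_succ_right (by omega : (0:Int) ≤ (m:Int)), List.foldl_append, ih]
    rw [List.foldl_cons, List.foldl_nil]
    rw [pyRange6_succ_right ((m : Int) + 1) (by omega)]
    split_ifs with h
    · refine Prod.ext ?_ ?_
      · rw [← h]
      · simp only [List.length_append, List.length_singleton]
        push_cast
        omega
    · rfl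

-- ===== VERDICT (by name: the statement is the Claim_ definition above) =====
theorem getSeparator_spec : Claim_equal_getSeparator := by
  intro n _
  unfold Spec_getSeparator getSeparator getSeparator_alt
  by_cases hn : 0 ≤ n
  · have hm : ((n + 1).toNat : Int) = n + 1 := Int.toNat_of_nonneg (by omega)
    have := loop_inv (n + 1).toNat
    rw [hm] at this
    rw [this]
    norm_num [add_assoc]
  · rw [PySem.List.pyRange_one_eq_nil (by omega),
        PySem.List.pyRange_of_pos 7 (n + 2) (by norm_num)]
    simp only [List.foldl_nil]
    rw [if_neg (by omega)]
    simp
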